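-- pv_equiv track=rewrite | github.com/dholth/advent-of-code | 2025/04/04.py | neighbors2
-- ===== SOURCE A (Python) =====
-- surrounds = [(x, y) for y in range(-1, 2) for x in range(-1, 2) if (x, y) != (0, 0)]
--
-- def neighbors2(grid: dict[tuple[int, int], str], seek):
--     """
--     Count how many neighbors of any cell in grid that contains "seek" equal "seek" (and not None or .), yield coordinate if less than 4.
--     """
--     for place in grid:
--         if grid[place] != seek:
--             continue
--         if (
--             sum(grid.get((place[0] + x, place[1] + y)) == seek for (x, y) in surrounds)
--             < 4
--         ):
--             yield place
-- ===== SOURCE B (Python) =====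
-- surrounds = [(x, y) for y in range(-1, 2) for x in range(-1, 2) if (x, y) != (0, 0)]
--
-- def neighbors2(grid, seek):
--     # scatter pass: count[p] = number of seek-cells adjacent to p
--     count = {}
--     for place, value in grid.items():
--         if value == seek:
--             for (x, y) in surrounds:
--                 n = (place[0] + x, place[1] + y)
--                 count[n] = count.get(n, 0) + 1
--     # emit pass, in grid order
--     for place, value in grid.items():
--         if value == seek and count.get(place, 0) < 4:
--             yield place
-- ===== Notes on version B (the rewrite author's own statement) =====
-- stated objective: alternative
-- what changed: Replaces A's per-cell gather (8 dict lookups summed for every seek cell) by a two-pass scatter/emit: a first pass increments a neighbour-count dict at each of the 8 offsets of every seek cell, a second pass emits the seek cells whose scattered count is below 4, in grid order.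
import Mathlib
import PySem

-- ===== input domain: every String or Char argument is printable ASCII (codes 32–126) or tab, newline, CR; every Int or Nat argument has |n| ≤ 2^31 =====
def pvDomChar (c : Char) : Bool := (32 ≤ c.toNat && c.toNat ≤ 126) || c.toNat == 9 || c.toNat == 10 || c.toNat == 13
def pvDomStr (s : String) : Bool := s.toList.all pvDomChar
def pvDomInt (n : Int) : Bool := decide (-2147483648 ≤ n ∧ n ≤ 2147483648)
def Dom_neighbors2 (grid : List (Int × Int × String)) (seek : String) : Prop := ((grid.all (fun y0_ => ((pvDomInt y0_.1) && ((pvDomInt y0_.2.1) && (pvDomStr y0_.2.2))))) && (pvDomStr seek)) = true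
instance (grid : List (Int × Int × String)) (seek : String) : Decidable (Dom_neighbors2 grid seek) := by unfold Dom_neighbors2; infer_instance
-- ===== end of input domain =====

-- B scatters +1 into a neighbour-count dict over each seek cell's 8 offsets and then emits the
-- seek cells with count < 4 in grid order, instead of A's per-cell gather of 8 lookups (alternative decomposition, same cost).

-- module constant: surrounds = [(x, y) for y in range(-1, 2) for x in range(-1, 2) if (x, y) != (0, 0)]
def surrounds : List (Int × Int) :=
  (PySem.List.pyRange (-1) 2 1).flatMap (fun y =>
    (PySem.List.pyRange (-1) 2 1).flatMap (fun x =>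
      if (x, y) ≠ ((0 : Int), (0 : Int)) then [(x, y)] else []))

-- ===== PORT A =====
-- the Python receives the grid as a dict: the association list is marshalled into a PySem.Dict first
def neighbors2 (grid : List (Int × Int × String)) (seek : String) : List (Int × Int) :=
  let d : PySem.Dict (Int × Int) String :=
    PySem.Dict.ofList (grid.map (fun e => ((e.1, e.2.1), e.2.2)))
  d.keys.foldl (fun acc place =>
    if d.get? place ≠ some seek then acc
    else if (surrounds.map (fun off =>
        if d.get? (place.1 + off.1, place.2 + off.2) = some seek then (1 : Int) else 0)).sum < 4
    then acc ++ [place] else acc) []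

-- ===== PORT B =====
def neighbors2_alt (grid : List (Int × Int × String)) (seek : String) : List (Int × Int) :=
  let d : PySem.Dict (Int × Int) String :=
    PySem.Dict.ofList (grid.map (fun e => ((e.1, e.2.1), e.2.2)))
  let count : PySem.Dict (Int × Int) Int :=
    d.items.foldl (fun c e =>
      if e.2 = seek then
        surrounds.foldl (fun c off => c.modify (e.1.1 + off.1, e.1.2 + off.2) 0 (· + 1)) c
      else c) PySem.Dict.empty
  d.items.foldl (fun acc e =>
    if e.2 = seek ∧ count.getD e.1 0 < 4 then acc ++ [e.1] else acc) []

-- ===== PRECONDITION & SPEC =====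
def Spec_neighbors2 (grid : List (Int × Int × String)) (seek : String) (out : List (Int × Int)) : Prop := out = neighbors2_alt grid seek
instance (grid : List (Int × Int × String)) (seek : String) (out : List (Int × Int)) : Decidable (Spec_neighbors2 grid seek out) := by unfold Spec_neighbors2; infer_instance

-- ===== CLAIM (what is proved, stated in full; the proofs are below) =====
def Claim_equal_neighbors2 : Prop := ∀ (grid : List (Int × Int × String)) (seek : String), Dom_neighbors2 grid seek → Spec_neighbors2 grid seek (neighbors2 grid seek)

-- ===== LEMMAS AND PROOFS =====

theorem surrounds_eq : surrounds = [(-1,-1),(0,-1),(1,-1),(-1,0),(1,0),(-1,1),(0,1),(1,1)] := by decide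

theorem countP_shift (q z : Int × Int) :
    (surrounds.countP (fun off => (q.1 + off.1, q.2 + off.2) = z)) =
      if (z.1 - q.1, z.2 - q.2) ∈ surrounds then 1 else 0 := by
  obtain ⟨q1, q2⟩ := q; obtain ⟨z1, z2⟩ := z
  simp only [surrounds_eq, List.countP_cons, List.countP_nil, List.mem_cons, List.not_mem_nil,
    Prod.mk.injEq, decide_eq_true_eq, or_false]
  split_ifs <;> omega

theorem surrounds_neg_mem (a b : Int) : (a, b) ∈ surrounds ↔ (-a, -b) ∈ surrounds := by
  simp only [surrounds_eq, List.mem_cons, List.not_mem_nil, Prod.mk.injEq, or_false]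
  omega

-- scatter loop characterisation: the count at z is the number of seek entries whose offset reaches z
theorem scatter_getD (seek : String) (l : List ((Int × Int) × String))
    (c : PySem.Dict (Int × Int) Int) (z : Int × Int) :
    (l.foldl (fun c e =>
        if e.2 = seek then
          surrounds.foldl (fun c off => c.modify (e.1.1 + off.1, e.1.2 + off.2) 0 (· + 1)) c
        else c) c).getD z 0
      = c.getD z 0 +
        (l.map (fun e => if e.2 = seek ∧ (z.1 - e.1.1, z.2 - e.1.2) ∈ surrounds then (1:Int) else 0)).sum := by
  induction l generalizing c with
  | nil => simp
  | cons e l ih =>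
    simp only [List.foldl_cons, List.map_cons, List.sum_cons, ih]
    by_cases h : e.2 = seek
    · rw [if_pos h,
        ← List.foldl_map (f := fun off : Int × Int => (e.1.1 + off.1, e.1.2 + off.2))
          (g := fun (c : PySem.Dict (Int × Int) Int) x => c.modify x 0 (· + 1)) (l := surrounds) (init := c),
        PySem.Dict.getD_foldl_modify_add_one]
      have hc : (surrounds.map (fun off => (e.1.1 + off.1, e.1.2 + off.2))).count z
          = surrounds.countP (fun off => (e.1.1 + off.1, e.1.2 + off.2) = z) := by
        rw [List.count, List.countP_map]
        exact List.countP_congr (fun x _ => by simp)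
      rw [hc, countP_shift]
      simp only [h, true_and]
      split_ifs <;> push_cast <;> ring
    · rw [if_neg h, if_neg (by simp [h])]
      ring

-- with unique keys, the (key, value) pair occurs exactly once when present
theorem countP_pair_of_nodup (l : List ((Int × Int) × String))
    (h : (l.map (·.1)).Nodup) (k : Int × Int) (v : String) :
    l.countP (fun e => e.1 = k ∧ e.2 = v) = if (k, v) ∈ l then 1 else 0 := by
  induction l with
  | nil => simp
  | cons a l ih =>
    simp only [List.map_cons, List.nodup_cons] at h
    rw [List.countP_cons, ih h.2]
    by_cases ha : a = (k, v)
    · subst ha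
      have hnm : (k, v) ∉ l := fun hm => h.1 (by simpa using List.mem_map_of_mem (f := (·.1)) hm)
      simp [hnm]
    · have h1 : ¬(a.1 = k ∧ a.2 = v) := fun hc => ha (Prod.ext hc.1 hc.2)
      have h2 : (k, v) ≠ a := fun h' => ha h'.symm
      simp [h1, h2, List.mem_cons]

-- Prop-ite bridge to PySem.List.sum_map_ite_one_zero (whose indicator is Bool-valued)
theorem sum_map_ite_int {α : Type} (p : α → Prop) [DecidablePred p] (l : List α) :
    (l.map (fun x => if p x then (1:Int) else 0)).sum = l.countP (fun x => p x) := by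
  rw [← PySem.List.sum_map_ite_one_zero (p := fun x => decide (p x))]
  exact congrArg List.sum (List.map_congr_left (fun x _ => by by_cases h : p x <;> simp [h]))

-- double counting: swap the two summations
theorem sum_comm_list {α β : Type} (l1 : List α) (l2 : List β) (f : α → β → Int) :
    (l1.map (fun a => (l2.map (f a)).sum)).sum = (l2.map (fun b => (l1.map (fun a => f a b)).sum)).sum := by
  induction l1 with
  | nil => simp
  | cons a l1 ih =>
    simp only [List.map_cons, List.sum_cons, ih]
    rw [← PySem.List.sum_map_add_int]

-- A's gather sum at p equals B's scatter contribution sum at p (unique keys)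
theorem gather_eq (seek : String) (d : PySem.Dict (Int × Int) String)
    (hnd : d.keys.Nodup) (p : Int × Int) :
    (surrounds.map (fun off =>
        if d.get? (p.1 + off.1, p.2 + off.2) = some seek then (1:Int) else 0)).sum
      = (d.items.map (fun e =>
          if e.2 = seek ∧ (p.1 - e.1.1, p.2 - e.1.2) ∈ surrounds then (1:Int) else 0)).sum := by
  have hndi : (d.items.map (·.1)).Nodup := hnd
  have step1 : ∀ k : Int × Int, (if d.get? k = some seek then (1:Int) else 0)
      = (d.items.map (fun e => if e.1 = k ∧ e.2 = seek then (1:Int) else 0)).sum := by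
    intro k
    rw [sum_map_ite_int (fun e : (Int × Int) × String => e.1 = k ∧ e.2 = seek), countP_pair_of_nodup _ hndi k seek]
    by_cases hk : d.get? k = some seek
    · rw [if_pos hk, if_pos ((PySem.Dict.get?_eq_some_iff_mem_items d k seek hnd).1 hk)]
      rfl
    · rw [if_neg hk, if_neg (fun hm => hk (PySem.Dict.get?_of_mem_items d hm hnd))]
      rfl
  calc (surrounds.map (fun off =>
        if d.get? (p.1 + off.1, p.2 + off.2) = some seek then (1:Int) else 0)).sum
      = (surrounds.map (fun off => (d.items.map (fun e =>
          if e.1 = (p.1 + off.1, p.2 + off.2) ∧ e.2 = seek then (1:Int) else 0)).sum)).sum := by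
        exact congrArg List.sum (List.map_congr_left (fun off _ => step1 _))
    _ = (d.items.map (fun e => (surrounds.map (fun off =>
          if e.1 = (p.1 + off.1, p.2 + off.2) ∧ e.2 = seek then (1:Int) else 0)).sum)).sum :=
        sum_comm_list surrounds d.items _
    _ = (d.items.map (fun e =>
          if e.2 = seek ∧ (p.1 - e.1.1, p.2 - e.1.2) ∈ surrounds then (1:Int) else 0)).sum := by
        refine congrArg List.sum (List.map_congr_left (fun e _ => ?_))
        by_cases he : e.2 = seek
        · simp only [he, and_true, true_and]
          rw [sum_map_ite_int (fun off : Int × Int => e.1 = (p.1 + off.1, p.2 + off.2))]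
          have : surrounds.countP (fun off => e.1 = (p.1 + off.1, p.2 + off.2))
              = surrounds.countP (fun off => (p.1 + off.1, p.2 + off.2) = e.1) :=
            List.countP_congr (fun x _ => by simp [eq_comm])
          rw [this, countP_shift]
          have hsym : (e.1.1 - p.1, e.1.2 - p.2) ∈ surrounds ↔ (p.1 - e.1.1, p.2 - e.1.2) ∈ surrounds := by
            rw [surrounds_neg_mem]
            constructor <;> (intro hx; convert hx using 2 <;> ring)
          split_ifs with h1 h2 h2 <;> first | rfl | (exact absurd (hsym.1 h1) h2) | (exact absurd (hsym.2 h2) h1)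
        · simp [he]
theorem main_eq (grid : List (Int × Int × String)) (seek : String) :
    neighbors2 grid seek = neighbors2_alt grid seek := by
  unfold neighbors2 neighbors2_alt
  dsimp only
  set d : PySem.Dict (Int × Int) String :=
    PySem.Dict.ofList (grid.map (fun e => ((e.1, e.2.1), e.2.2))) with hd
  have hnd : d.keys.Nodup := PySem.Dict.nodup_keys_ofList _
  have hk : d.keys = d.items.map (·.1) := rfl
  rw [hk, List.foldl_map]
  refine PySem.List.foldl_congr_mem _ _ _ _ (fun acc e he => ?_)
  have hget : d.get? e.1 = some e.2 := PySem.Dict.get?_of_mem_items d he hnd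
  have hcount : (d.items.foldl (fun c e =>
      if e.2 = seek then
        surrounds.foldl (fun c off => c.modify (e.1.1 + off.1, e.1.2 + off.2) 0 (· + 1)) c
      else c) PySem.Dict.empty).getD e.1 0
      = (surrounds.map (fun off =>
          if d.get? (e.1.1 + off.1, e.1.2 + off.2) = some seek then (1 : Int) else 0)).sum := by
    rw [scatter_getD, PySem.Dict.getD_empty, gather_eq seek d hnd e.1, zero_add]
  by_cases hs : e.2 = seek
  · simp only [hget, hs, ne_eq, not_true_eq_false, if_false, true_and, hcount]
  · have : ¬(d.get? e.1 = some seek) := by simp [hget, hs]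
    simp [this, hs]

-- ===== VERDICT (by name: the statement is the Claim_ definition above) =====
theorem neighbors2_spec : Claim_equal_neighbors2 := by
  intro grid seek _
  unfold Spec_neighbors2
  exact main_eq grid seek
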